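-- pv_equiv track=rewrite | github.com/chuckwwong/Sherpa_api | server/src/makeEvals.py | make_linksTable
-- ===== SOURCE A (Python) =====
-- def make_linksTable( linkDefs ):
--
--     linkTable = []
--     linkNames = []
--
--     ### pad the end of sips with ''
--
--     for (n1,n2) in linkDefs:
--         linkNames.append(n1+'-'+n2)
--
--     residuals = len(linkNames)%4
--
--     if residuals:
--         for sidx in range(0,4-residuals):
--             linkNames.append(' ')
--
--     for idx in range(0,len(linkNames),4):
--         linkTable.append( '\t'.join([linkNames[idx],linkNames[idx+1],\
--             linkNames[idx+2],linkNames[idx+3]]))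
--
--     if residuals:
--         for sidx in range(0,4-residuals):
--             linkNames.pop()
--
--     return linkNames, linkTable
-- ===== SOURCE B (Python) =====
-- def make_linksTable(linkDefs):
--     linkNames = [n1 + '-' + n2 for (n1, n2) in linkDefs]
--     linkTable = []
--     row = []
--     for name in linkNames:
--         row = row + [name]
--         if len(row) == 4:
--             linkTable.append('\t'.join(row))
--             row = []
--     if row:
--         row = row + [' '] * (4 - len(row))
--         linkTable.append('\t'.join(row))
--     return linkNames, linkTable
-- ===== Notes on version B (the rewrite author's own statement) =====
-- stated objective: simpler
-- what changed: Instead of padding the name list, joining fixed index quadruples over range(0,len,4), and popping the padding back off, B builds the rows in one accumulating pass with a 4-element buffer that is flushed when full and padded once at the end, leaving linkNames untouched.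
import Mathlib
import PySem

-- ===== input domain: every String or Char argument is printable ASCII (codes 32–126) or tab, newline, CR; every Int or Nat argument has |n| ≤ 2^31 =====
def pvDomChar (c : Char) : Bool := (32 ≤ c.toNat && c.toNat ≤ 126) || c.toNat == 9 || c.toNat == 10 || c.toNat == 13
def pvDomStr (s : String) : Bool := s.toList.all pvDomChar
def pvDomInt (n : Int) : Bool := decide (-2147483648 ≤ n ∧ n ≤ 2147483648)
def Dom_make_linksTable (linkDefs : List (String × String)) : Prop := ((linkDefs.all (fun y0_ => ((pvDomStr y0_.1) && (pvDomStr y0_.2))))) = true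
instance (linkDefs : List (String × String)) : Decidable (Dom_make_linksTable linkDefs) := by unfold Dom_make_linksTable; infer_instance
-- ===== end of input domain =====

-- B replaces A's pad/index-by-fours/pop dance with one accumulating pass (4-element buffer, flushed when full, padded once at the end); same results, simpler shape.

-- ===== PORT A =====
-- the loop body of A's row loop: '\t'.join of the entries at idx..idx+3 (always in range: the list was padded to a multiple of 4)
def pyA_row (ys acc : List String) (idx : Int) : List String :=
  acc ++ [PySem.Str.join "\t"
    [PySem.List.pyGetD ys idx "", PySem.List.pyGetD ys (idx+1) "",
     PySem.List.pyGetD ys (idx+2) "", PySem.List.pyGetD ys (idx+3) ""]]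

def make_linksTable (linkDefs : List (String × String)) : List String × List String :=
  let linkNames : List String := linkDefs.foldl (fun acc p => acc ++ [p.1 ++ "-" ++ p.2]) []
  let residuals : Int := PySem.Int.mod (linkNames.length : Int) 4
  let linkNames2 : List String :=
    if residuals ≠ 0 then
      (PySem.List.pyRange 0 (4 - residuals) 1).foldl (fun acc _ => acc ++ [" "]) linkNames
    else linkNames
  let linkTable : List String :=
    (PySem.List.pyRange 0 ((linkNames2.length : Int)) 4).foldl (pyA_row linkNames2) []
  let linkNames3 : List String :=
    if residuals ≠ 0 then
      (PySem.List.pyRange 0 (4 - residuals) 1).foldl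
        (fun acc _ => ((PySem.List.pop? acc).map Prod.snd).getD acc) linkNames2
    else linkNames2
  (linkNames3, linkTable)

-- ===== PORT B =====
-- one step of B's accumulating pass: append the name to the buffer, flush the buffer as a row once it has 4 entries
def pyB_step (st : List String × List String) (name : String) : List String × List String :=
  let row := st.2 ++ [name]
  if row.length = 4 then (st.1 ++ [PySem.Str.join "\t" row], []) else (st.1, row)

def make_linksTable_alt (linkDefs : List (String × String)) : List String × List String :=
  let linkNames := linkDefs.map (fun p => p.1 ++ "-" ++ p.2)
  let st := linkNames.foldl pyB_step ([], [])
  let linkTable :=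
    if st.2 ≠ [] then
      st.1 ++ [PySem.Str.join "\t" (st.2 ++ List.replicate (4 - st.2.length) " ")]
    else st.1
  (linkNames, linkTable)

-- ===== PRECONDITION & SPEC =====
def Spec_make_linksTable (linkDefs : List (String × String)) (out : List String × List String) : Prop := out = make_linksTable_alt linkDefs
instance (linkDefs : List (String × String)) (out : List String × List String) : Decidable (Spec_make_linksTable linkDefs out) := by unfold Spec_make_linksTable; infer_instance

-- ===== CLAIM (what is proved, stated in full; the proofs are below) =====
def Claim_equal_make_linksTable : Prop := ∀ (linkDefs : List (String × String)), Dom_make_linksTable linkDefs → Spec_make_linksTable linkDefs (make_linksTable linkDefs)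

-- ===== LEMMAS AND PROOFS =====
-- the rows a chunk-into-fours pass produces, and the leftover (< 4 names) it does not consume
def chunk4 : List String → List String
  | a::b::c::d::rest => PySem.Str.join "\t" [a,b,c,d] :: chunk4 rest
  | _ => []

def rem4 : List String → List String
  | _::_::_::_::rest => rem4 rest
  | xs => xs

theorem short_of_no4 (t : List String)
    (h : ∀ a b c d rest, t = a::b::c::d::rest → False) : t.length < 4 := by
  rcases t with _|⟨a,_|⟨b,_|⟨c,_|⟨d,r⟩⟩⟩⟩
  · simp
  · simp
  · simp
  · simp
  · exact absurd rfl (h a b c d r)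

theorem chunk4_short (xs : List String) (h : xs.length < 4) : chunk4 xs = [] := by
  rcases xs with _|⟨a,_|⟨b,_|⟨c,_|⟨d,r⟩⟩⟩⟩ <;> first | rfl | (simp at h; omega)

theorem rem4_short (xs : List String) (h : xs.length < 4) : rem4 xs = xs := by
  rcases xs with _|⟨a,_|⟨b,_|⟨c,_|⟨d,r⟩⟩⟩⟩ <;> first | rfl | (simp at h; omega)

theorem rem4_length (xs : List String) : (rem4 xs).length = xs.length % 4 := by
  induction xs using rem4.induct with
  | case1 a b c d rest ih => simp only [rem4, ih, List.length_cons]; omega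
  | case2 t h =>
    have ht := short_of_no4 t h
    rw [rem4_short t ht]; omega

theorem chunk4_append (xs zs : List String) :
    chunk4 (xs ++ zs) = chunk4 xs ++ chunk4 (rem4 xs ++ zs) := by
  induction xs using chunk4.induct with
  | case1 a b c d rest ih => simp [chunk4, rem4, ih]
  | case2 t h =>
    have ht := short_of_no4 t h
    rw [chunk4_short t ht, rem4_short t ht]; simp

theorem chunk4_of_len4 (v : List String) (h : v.length = 4) :
    chunk4 v = [PySem.Str.join "\t" v] := by
  rcases v with _|⟨a,_|⟨b,_|⟨c,_|⟨d,_|⟨e,r⟩⟩⟩⟩⟩ <;> simp_all [chunk4]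

theorem bfold (xs : List String) : ∀ (table row : List String), row.length ≤ 3 →
    xs.foldl pyB_step (table, row) = (table ++ chunk4 (row ++ xs), rem4 (row ++ xs)) := by
  induction xs with
  | nil =>
    intro table row h
    simp [chunk4_short row (by omega), rem4_short row (by omega)]
  | cons n xs ih =>
    intro table row h
    rcases row with _|⟨a,_|⟨b,_|⟨c,_|⟨d,r⟩⟩⟩⟩
    · simpa [pyB_step] using ih table [n] (by simp)
    · simpa [pyB_step] using ih table [a,n] (by simp)
    · simpa [pyB_step] using ih table [a,b,n] (by simp)
    · simpa [pyB_step, chunk4] using ih (table ++ [PySem.Str.join "\t" [a,b,c,n]]) [] (by simp)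
    · simp only [List.length_cons] at h; omega

theorem popfold (k : Nat) : ∀ (j : Nat) (names : List String),
    (PySem.List.pyRange 0 (k : Int) 1).foldl
        (fun acc _ => ((PySem.List.pop? acc).map Prod.snd).getD acc)
        (names ++ List.replicate (k + j) " ")
      = names ++ List.replicate j " " := by
  induction k with
  | zero => intro j names; simp [PySem.List.pyRange_one_eq_nil (by omega : (0:Int) ≤ 0)]
  | succ k ih =>
    intro j names
    have hc : ((k+1 : Nat) : Int) = (k : Int) + 1 := by push_cast; ring
    rw [hc, PySem.List.pyRange_one_succ_right (by positivity), List.foldl_append]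
    have he : k + 1 + j = k + (j + 1) := by omega
    rw [he, ih (j+1) names, List.replicate_succ' (n := j)]
    simp [← List.append_assoc, PySem.List.pop?_last]

theorem range4_shift (m : Nat) (h : m % 4 = 0) :
    PySem.List.pyRange 0 ((m : Int) + 4) 4
      = 0 :: (PySem.List.pyRange 0 (m : Int) 4).map (· + 4) := by
  obtain ⟨q, rfl⟩ : ∃ q, m = 4 * q := ⟨m / 4, by omega⟩
  rw [PySem.List.pyRange_of_pos _ _ (by norm_num), PySem.List.pyRange_of_pos _ _ (by norm_num)]
  have h1 : (((4*q : Nat) : Int) + 4 - 0 + 4 - 1) / 4 = (q : Int) + 1 := by push_cast; omega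
  have h2 : (0 : Int) < (4*q : Nat) + 4 := by positivity
  rw [if_pos h2, h1]
  have h3 : ((q : Int) + 1).toNat = q + 1 := by omega
  rw [h3]
  by_cases hq : 0 < (((4*q : Nat) : Int))
  · rw [if_pos hq]
    have h5 : (((4*q : Nat) : Int) - 0 + 4 - 1) / 4 = (q : Int) := by push_cast; omega
    rw [h5]
    have h4 : ((q : Int)).toNat = q := by omega
    rw [h4, List.range_succ_eq_map]
    simp [List.map_map, Function.comp]
    intro a _; ring
  · have hq0 : q = 0 := by omega
    subst hq0
    simp

theorem pyGetD_shift4 (a b c d : String) (xs : List String) (j : Int) (hj : 0 ≤ j) :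
    PySem.List.pyGetD (a::b::c::d::xs) (j+4) "" = PySem.List.pyGetD xs j "" := by
  rw [PySem.List.pyGetD_of_nonneg _ _ (by omega), PySem.List.pyGetD_of_nonneg _ _ hj]
  have h : (j+4).toNat = j.toNat + 4 := by omega
  simp [h]

theorem afold (ys : List String) (h : ys.length % 4 = 0) : ∀ (acc : List String),
    (PySem.List.pyRange 0 ((ys.length : Int)) 4).foldl (pyA_row ys) acc = acc ++ chunk4 ys := by
  induction ys using chunk4.induct with
  | case1 a b c d rest ih =>
    intro acc
    have hr : rest.length % 4 = 0 := by simp at h; omega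
    have hlen : (((a::b::c::d::rest).length : Nat) : Int) = (rest.length : Int) + 4 := by
      simp; ring
    rw [hlen, range4_shift rest.length hr, List.foldl_cons, List.foldl_map]
    have hstep : pyA_row (a::b::c::d::rest) acc 0 = acc ++ [PySem.Str.join "\t" [a,b,c,d]] := by
      simp only [pyA_row]
      norm_num [PySem.List.pyGetD_ofNat']
    rw [hstep]
    rw [PySem.List.foldl_congr_mem _ _ (pyA_row rest) _ (by
      intro acc' x hx
      have hx0 : 0 ≤ x := ((PySem.List.mem_pyRange_iff_of_pos (by norm_num) x).1 hx).1
      simp only [pyA_row]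
      rw [show x+4+1 = (x+1)+4 by ring, show x+4+2 = (x+2)+4 by ring,
          show x+4+3 = (x+3)+4 by ring,
          pyGetD_shift4 a b c d rest x hx0, pyGetD_shift4 a b c d rest (x+1) (by omega),
          pyGetD_shift4 a b c d rest (x+2) (by omega), pyGetD_shift4 a b c d rest (x+3) (by omega)])]
    rw [ih hr (acc ++ [PySem.Str.join "\t" [a,b,c,d]])]
    simp [chunk4]
  | case2 t ht =>
    intro acc
    have hlt := short_of_no4 t ht
    have h0 : t.length = 0 := by omega
    rw [h0, chunk4_short t hlt]
    simp [PySem.List.pyRange]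

-- ===== VERDICT (by name: the statement is the Claim_ definition above) =====
theorem make_linksTable_spec : Claim_equal_make_linksTable := by
  unfold Claim_equal_make_linksTable
  intro linkDefs _
  unfold Spec_make_linksTable make_linksTable make_linksTable_alt
  simp only [PySem.List.foldl_append_singleton_eq_map, List.nil_append]
  set names := linkDefs.map (fun p => p.1 ++ "-" ++ p.2) with hnames
  have hmod : PySem.Int.mod (names.length : Int) 4 = ((names.length % 4 : Nat) : Int) := by
    exact_mod_cast PySem.Int.mod_natCast names.length 4
  rw [hmod]
  set r : Nat := names.length % 4 with hrdef
  have hr4 : r < 4 := Nat.mod_lt _ (by norm_num)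
  rw [bfold names [] [] (by simp)]
  simp only [List.nil_append]
  by_cases hr : r = 0
  · have hrz : ((r : Nat) : Int) = 0 := by simp [hr]
    rw [hrz]
    simp only [ne_eq, not_true_eq_false, if_false]
    have hrem : rem4 names = [] := by
      have := rem4_length names
      rw [← hrdef, hr] at this
      exact List.length_eq_zero_iff.mp this
    rw [afold names (by omega) []]
    simp [hrem]
  · have hrnz : ¬(((r : Nat) : Int) = 0) := by exact_mod_cast hr
    simp only [ne_eq, hrnz, not_false_eq_true, if_true]
    have hk : (4 : Int) - ((r : Nat) : Int) = (((4 - r : Nat) : Nat) : Int) := by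
      omega
    have hpadmap : (PySem.List.pyRange 0 (((4 - r : Nat)) : Int) 1).map (fun _ => " ") = List.replicate (4 - r) " " := by
      simp [List.map_const', PySem.List.length_pyRange_one]
    rw [hk, hpadmap]
    have hpadlen : (names ++ List.replicate (4 - r) " ").length % 4 = 0 := by
      simp [List.length_append]; omega
    rw [afold _ hpadlen []]
    have hpop : (PySem.List.pyRange 0 (((4 - r : Nat) : Int)) 1).foldl
        (fun acc _ => ((PySem.List.pop? acc).map Prod.snd).getD acc)
        (names ++ List.replicate (4 - r) " ") = names := by
      have := popfold (4 - r) 0 names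
      simpa using this
    rw [hpop]
    have hremlen : (rem4 names).length = r := by rw [rem4_length]
    have hremne : rem4 names ≠ [] := by
      intro hnil; rw [hnil] at hremlen; simp at hremlen; omega
    simp only [hremne, not_false_eq_true, if_true]
    rw [chunk4_append names (List.replicate (4 - r) " ")]
    rw [chunk4_of_len4 (rem4 names ++ List.replicate (4 - r) " ") (by
      simp [hremlen]; omega)]
    rw [hremlen]
    simp
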